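-- pv_equiv track=rewrite | github.com/sdgandhi/Timesig | timesig.py | printBar8
-- ===== SOURCE A (Python) =====
-- def printBar8(curBeat):
-- 	if curBeat == 0:
-- 		return "| | | | | | | | |"
-- 	if curBeat%8 == 0:
-- 		return '| | | | | | | |X|'
-- 	returnStr = []
-- 	returnStr.append('|')
-- 	for i in range(0,curBeat%8-1):
-- 		returnStr.append(' |')
-- 	else:
-- 		returnStr.append('X|')
-- 	for i in range(0,8 - (curBeat%8)):
-- 		if curBeat%8 == 0:
-- 			break
-- 		returnStr.append(' |')
--
-- 	return ''.join(returnStr)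
-- ===== SOURCE B (Python) =====
-- def printBar8(curBeat):
--     pos = curBeat % 8
--     cells = [' '] * 8
--     if curBeat != 0:
--         cells[pos - 1] = 'X'
--     return '|' + '|'.join(cells) + '|'
-- ===== Notes on version B (the rewrite author's own statement) =====
-- stated objective: simpler
-- what changed: B places the X by direct indexing into a fixed 8-cell list (pos = curBeat % 8, cells[pos-1] = 'X', with the -1 wrap handling multiples of 8) and joins once, instead of A's two count-driven append loops plus two special-case early returns.
import Mathlib
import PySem

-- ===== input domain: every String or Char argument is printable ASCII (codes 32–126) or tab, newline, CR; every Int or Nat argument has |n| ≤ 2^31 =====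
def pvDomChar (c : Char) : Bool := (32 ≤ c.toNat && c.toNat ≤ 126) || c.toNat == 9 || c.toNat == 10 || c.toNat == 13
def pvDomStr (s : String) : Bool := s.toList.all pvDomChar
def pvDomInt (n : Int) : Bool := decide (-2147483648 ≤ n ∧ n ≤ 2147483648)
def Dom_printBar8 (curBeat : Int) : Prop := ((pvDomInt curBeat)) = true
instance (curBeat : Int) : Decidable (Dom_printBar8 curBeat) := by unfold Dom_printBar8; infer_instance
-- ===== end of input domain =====

-- B renders the bar by direct indexing (cells[curBeat%8 - 1] = 'X') instead of A's two append loops; objective: simpler.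

-- ===== PORT A =====
def printBar8 (curBeat : Int) : String :=
  if curBeat == 0 then "| | | | | | | | |"
  else if curBeat % 8 == 0 then "| | | | | | | |X|"
  else
    let returnStr : List String := ["|"]
    let returnStr := (PySem.List.pyRange 0 (curBeat % 8 - 1) 1).foldl
      (fun acc _ => acc ++ [" |"]) returnStr
    -- for ... else: the loop body has no break, so the else clause always runs
    let returnStr := returnStr ++ ["X|"]
    -- second loop carries a 'done' flag to model the break faithfully
    let st := (PySem.List.pyRange 0 (8 - curBeat % 8) 1).foldl
      (fun (s : Bool × List String) _ =>
        if s.1 then s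
        else if curBeat % 8 == 0 then (true, s.2)
        else (s.1, s.2 ++ [" |"])) (false, returnStr)
    PySem.Str.join "" st.2

-- ===== PORT B =====
def printBar8_alt (curBeat : Int) : String :=
  let pos := curBeat % 8
  let cells : List String := List.replicate 8 " "
  let cells := if curBeat != 0 then
      -- cells[pos - 1]: Python's negative index -1 (when pos = 0) wraps to the last cell
      let i := pos - 1
      let i := if i < 0 then i + 8 else i
      cells.set i.toNat "X"
    else cells
  "|" ++ PySem.Str.join "|" cells ++ "|"

-- ===== PRECONDITION & SPEC =====
def Spec_printBar8 (curBeat : Int) (out : String) : Prop := out = printBar8_alt curBeat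
instance (curBeat : Int) (out : String) : Decidable (Spec_printBar8 curBeat out) := by unfold Spec_printBar8; infer_instance

-- ===== CLAIM (what is proved, stated in full; the proofs are below) =====
def Claim_equal_printBar8 : Prop := ∀ (curBeat : Int), Dom_printBar8 curBeat → Spec_printBar8 curBeat (printBar8 curBeat)

-- ===== LEMMAS AND PROOFS =====

-- ===== VERDICT (by name: the statement is the Claim_ definition above) =====
theorem printBar8_spec : Claim_equal_printBar8 := by
  intro c _
  unfold Spec_printBar8 printBar8 printBar8_alt
  by_cases h0 : c = 0
  · subst h0; decide
  · have h1 : 0 ≤ c % 8 := Int.emod_nonneg c (by norm_num)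
    have h2 : c % 8 < 8 := Int.emod_lt_of_pos c (by norm_num)
    obtain ⟨r, hr⟩ : ∃ r, c % 8 = r := ⟨_, rfl⟩
    rw [hr] at h1 h2
    simp only [hr, h0, beq_iff_eq, if_false, bne_iff_ne, ne_eq, not_false_eq_true, if_true]
    interval_cases r <;> decide
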